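-- pv_equiv track=rewrite | github.com/EugeniusK/CrossNumber | functions.py | vampire
-- ===== SOURCE A (Python) =====
-- import math, json
--
-- arr = []
--
-- def vampire(MAX_SIZE):
--     # vampire
--     arr = []
--     n = 1000
--     while n < MAX_SIZE:
--         list_n = sorted(list(str(n)))
--         for x in range(1, math.isqrt(n) + 1):
--             if n % x == 0 and sorted(list(str(x)) + list(str(n // x))) == list_n:
--                 arr.append(n)
--                 break
--         n += 1
--     arr.remove(0) if 0 in arr else None
--     return sorted(list(set(arr)))
-- ===== SOURCE B (Python) =====
-- import math
--
-- def vampire(MAX_SIZE):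
--     found = set()
--     if MAX_SIZE > 1:
--         for x in range(1, math.isqrt(MAX_SIZE - 1) + 1):
--             for y in range(x, (MAX_SIZE - 1) // x + 1):
--                 n = x * y
--                 if n >= 1000 and sorted(str(x) + str(y)) == sorted(str(n)):
--                     found.add(n)
--     return sorted(found)
-- ===== Notes on version B (the rewrite author's own statement) =====
-- stated objective: faster
-- what changed: B enumerates factor pairs (x, y) with x <= y and x*y < MAX_SIZE and collects products whose digit multiset matches into a set, instead of A's per-number trial-division scan up to isqrt(n) for every candidate n below MAX_SIZE.
import Mathlib
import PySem

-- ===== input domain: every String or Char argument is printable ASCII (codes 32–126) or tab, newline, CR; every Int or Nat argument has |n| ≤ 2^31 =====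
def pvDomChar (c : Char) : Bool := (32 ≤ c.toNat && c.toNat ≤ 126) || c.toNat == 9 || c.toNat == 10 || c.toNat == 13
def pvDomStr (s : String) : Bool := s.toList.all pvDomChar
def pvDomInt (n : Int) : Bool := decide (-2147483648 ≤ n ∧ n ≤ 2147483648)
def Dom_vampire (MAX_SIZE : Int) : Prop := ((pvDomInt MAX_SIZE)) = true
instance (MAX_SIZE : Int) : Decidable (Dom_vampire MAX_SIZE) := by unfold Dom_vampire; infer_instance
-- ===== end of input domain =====

-- B replaces A's per-number trial-division scan by generating factor pairs (x, y), x ≤ y,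
-- x*y < MAX_SIZE, into a set — asymptotically fewer divisor tests (objective: faster).

-- math.isqrt(n): exact for n ≥ 0; every call site below passes a nonnegative argument.
def pyIsqrt (n : Int) : Int := (Nat.sqrt n.toNat : Int)

-- sorted(str(x) + str(y)) == sorted(str(n)) — the digit-multiset test both Pythons write literally.
def digitsMatch (x y n : Int) : Bool :=
  PySem.List.sorted ((PySem.Int.toStr x).toList ++ (PySem.Int.toStr y).toList) (fun c => c) false
    == PySem.List.sorted (PySem.Int.toStr n).toList (fun c => c) false

-- ===== PORT A =====
def vampire (MAX_SIZE : Int) : List Int :=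
  let arr : List Int :=
    (PySem.List.pyRange 1000 MAX_SIZE 1).foldl
      (fun arr n =>
        if (PySem.List.pyRange 1 (pyIsqrt n + 1) 1).any
            (fun x => PySem.Int.mod n x == 0 && digitsMatch x (PySem.Int.floordiv n x) n)
        then arr ++ [n] else arr) []
  let arr2 := if (0:Int) ∈ arr then (PySem.List.remove? arr 0).getD arr else arr
  PySem.List.sorted (PySem.Set.ofList arr2) (fun v => v) false

-- ===== PORT B =====
def vampire_alt (MAX_SIZE : Int) : List Int :=
  let found : PySem.Set Int :=
    if 1 < MAX_SIZE then
      (PySem.List.pyRange 1 (pyIsqrt (MAX_SIZE - 1) + 1) 1).foldl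
        (fun s x =>
          (PySem.List.pyRange x (PySem.Int.floordiv (MAX_SIZE - 1) x + 1) 1).foldl
            (fun s y =>
              let n := x * y
              if decide (1000 ≤ n) && digitsMatch x y n then PySem.Set.add s n else s) s)
        PySem.Set.empty
    else PySem.Set.empty
  PySem.List.sorted found (fun v => v) false

-- ===== PRECONDITION & SPEC =====
def Spec_vampire (MAX_SIZE : Int) (out : List Int) : Prop := out = vampire_alt MAX_SIZE
instance (MAX_SIZE : Int) (out : List Int) : Decidable (Spec_vampire MAX_SIZE out) := by unfold Spec_vampire; infer_instance

-- ===== CLAIM (what is proved, stated in full; the proofs are below) =====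
def Claim_equal_vampire : Prop := ∀ (MAX_SIZE : Int), Dom_vampire MAX_SIZE → Spec_vampire MAX_SIZE (vampire MAX_SIZE)

-- ===== LEMMAS AND PROOFS =====

-- a fold that only ever adds elements: membership is "already there, or produced by some step"
lemma mem_foldl_step {α : Type} (l : List α) (F : PySem.Set Int → α → PySem.Set Int)
    (Q : α → Prop) (v : Int)
    (h : ∀ s x, x ∈ l → (v ∈ F s x ↔ v ∈ s ∨ Q x)) :
    ∀ s : PySem.Set Int, (v ∈ l.foldl F s ↔ v ∈ s ∨ ∃ x ∈ l, Q x) := by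
  induction l with
  | nil => simp
  | cons a t ih =>
    intro s
    simp only [List.foldl_cons]
    rw [ih (fun s x hx => h s x (by simp [hx])) (F s a), h s a (by simp)]
    simp only [List.mem_cons]
    constructor
    · rintro ((hv | hq) | ⟨x, hx, hq⟩)
      · exact Or.inl hv
      · exact Or.inr ⟨a, Or.inl rfl, hq⟩
      · exact Or.inr ⟨x, Or.inr hx, hq⟩
    · rintro (hv | ⟨x, (rfl | hx), hq⟩)
      · exact Or.inl (Or.inl hv)
      · exact Or.inl (Or.inr hq)
      · exact Or.inr ⟨x, hx, hq⟩

lemma nodup_foldl_step {α : Type} (l : List α) (F : PySem.Set Int → α → PySem.Set Int)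
    (h : ∀ s x, s.Nodup → (F s x).Nodup) :
    ∀ s : PySem.Set Int, s.Nodup → (l.foldl F s).Nodup := by
  induction l with
  | nil => intro s hs; simpa using hs
  | cons a t ih => intro s hs; exact ih (F s a) (h s a hs)

-- x ≤ isqrt n  ↔  x·x ≤ n   (for 0 ≤ x, 0 ≤ n)
lemma le_pyIsqrt_iff (x n : Int) (hx : 0 ≤ x) (hn : 0 ≤ n) :
    x ≤ pyIsqrt n ↔ x * x ≤ n := by
  unfold pyIsqrt
  rw [show x = (x.toNat : Int) by omega]
  constructor
  · intro h
    have h' : x.toNat ≤ Nat.sqrt n.toNat := by exact_mod_cast h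
    have := Nat.le_sqrt.mp h'
    omega
  · intro h
    have h' : x.toNat * x.toNat ≤ n.toNat := by
      have : (x.toNat : Int) * (x.toNat : Int) ≤ n := h
      omega
    exact_mod_cast Nat.le_sqrt.mpr h'

-- the arithmetic heart: being collected by A's scan ↔ being produced by B's pair generation
lemma key_iff (M v : Int) :
    ((1000 ≤ v ∧ v < M) ∧ ∃ x, (1 ≤ x ∧ x < pyIsqrt v + 1) ∧
        (PySem.Int.mod v x = 0 ∧ digitsMatch x (PySem.Int.floordiv v x) v = true))
    ↔ (1 < M ∧ ∃ x, (1 ≤ x ∧ x < pyIsqrt (M-1) + 1) ∧ ∃ y, (x ≤ y ∧ y < PySem.Int.floordiv (M-1) x + 1) ∧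
        ((1000 ≤ x*y ∧ digitsMatch x y (x*y) = true) ∧ v = x*y)) := by
  constructor
  · rintro ⟨⟨hv1000, hvM⟩, x, ⟨hx1, hxs⟩, hmod, hdig⟩
    have hx0 : 0 < x := by omega
    have hdvd : x ∣ v := (PySem.Int.mod_eq_zero_iff_dvd v x).mp hmod
    have hfd : PySem.Int.floordiv v x = v / x := PySem.Int.floordiv_eq_ediv_of_pos hx0
    set y := v / x with hy
    have hxy : x * y = v := Int.mul_ediv_cancel' hdvd
    have hxx : x * x ≤ v := (le_pyIsqrt_iff x v (by omega) (by omega)).mp (by omega)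
    have hyx : x ≤ y := by
      by_contra hlt
      rw [Int.not_le] at hlt
      nlinarith
    refine ⟨by omega, x, ⟨hx1, ?_⟩, y, ⟨hyx, ?_⟩, ⟨by omega, by rw [hxy]; rw [hfd] at hdig; exact hdig⟩, hxy.symm⟩
    · have : x * x ≤ M - 1 := by omega
      have := (le_pyIsqrt_iff x (M-1) (by omega) (by omega)).mpr this
      omega
    · have : y * x ≤ M - 1 := by nlinarith
      have := (PySem.Int.le_floordiv_iff_mul_le (a := M-1) (b := x) (q := y) hx0).mpr this
      omega
  · rintro ⟨hM, x, ⟨hx1, hxs⟩, y, ⟨hxy, hys⟩, ⟨hn1000, hdig⟩, rfl⟩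
    have hx0 : 0 < x := by omega
    have hyM : y * x ≤ M - 1 :=
      (PySem.Int.le_floordiv_iff_mul_le (a := M-1) (b := x) (q := y) hx0).mp (by omega)
    have hdvd : x ∣ x * y := Dvd.intro y rfl
    have hfd : PySem.Int.floordiv (x*y) x = y := by
      rw [PySem.Int.floordiv_eq_ediv_of_pos hx0, Int.mul_ediv_cancel_left _ (by omega)]
    refine ⟨⟨hn1000, by nlinarith⟩, x, ⟨hx1, ?_⟩, (PySem.Int.mod_eq_zero_iff_dvd _ _).mpr hdvd, by rw [hfd]; exact hdig⟩
    have hxx : x * x ≤ x * y := by nlinarith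
    have := (le_pyIsqrt_iff x (x*y) (by omega) (by omega)).mpr hxx
    omega

-- membership in B's set of found products
lemma mem_found (M v : Int) :
    v ∈ (PySem.List.pyRange 1 (pyIsqrt (M - 1) + 1) 1).foldl
        (fun s x =>
          (PySem.List.pyRange x (PySem.Int.floordiv (M - 1) x + 1) 1).foldl
            (fun s y =>
              let n := x * y
              if decide (1000 ≤ n) && digitsMatch x y n then PySem.Set.add s n else s) s)
        PySem.Set.empty
    ↔ ∃ x, (1 ≤ x ∧ x < pyIsqrt (M-1) + 1) ∧ ∃ y, (x ≤ y ∧ y < PySem.Int.floordiv (M-1) x + 1) ∧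
        ((1000 ≤ x*y ∧ digitsMatch x y (x*y) = true) ∧ v = x*y) := by
  rw [mem_foldl_step _ _
      (fun x => ∃ y, (x ≤ y ∧ y < PySem.Int.floordiv (M-1) x + 1) ∧
        ((1000 ≤ x*y ∧ digitsMatch x y (x*y) = true) ∧ v = x*y)) v ?_ PySem.Set.empty]
  · simp only [PySem.List.mem_pyRange_one]
    constructor
    · rintro (h | h)
      · simp [PySem.Set.empty] at h
      · exact h
    · exact Or.inr
  · intro s x _
    rw [mem_foldl_step _ _
        (fun y => (1000 ≤ x*y ∧ digitsMatch x y (x*y) = true) ∧ v = x*y) v ?_ s]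
    · simp [PySem.List.mem_pyRange_one]
    · intro t y _
      simp only []
      split_ifs with hc
      · simp only [PySem.Set.mem_add]
        simp only [Bool.and_eq_true, decide_eq_true_eq] at hc
        constructor
        · rintro (h | rfl)
          · exact Or.inl h
          · exact Or.inr ⟨⟨hc.1, hc.2⟩, rfl⟩
        · rintro (h | ⟨_, rfl⟩)
          · exact Or.inl h
          · exact Or.inr rfl
      · simp only [Bool.and_eq_true, decide_eq_true_eq] at hc
        constructor
        · exact Or.inl
        · rintro (h | ⟨⟨h1, h2⟩, rfl⟩)
          · exact h
          · exact absurd ⟨h1, h2⟩ hc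

-- ===== VERDICT (by name: the statement is the Claim_ definition above) =====
theorem vampire_spec : Claim_equal_vampire := by
  intro M _
  unfold Spec_vampire vampire vampire_alt
  simp only []
  rw [PySem.List.foldl_append_if_eq_filter]
  set p : Int → Bool := fun n =>
    (PySem.List.pyRange 1 (pyIsqrt n + 1) 1).any
      (fun x => PySem.Int.mod n x == 0 && digitsMatch x (PySem.Int.floordiv n x) n) with hp
  set arr := [] ++ (PySem.List.pyRange 1000 M 1).filter p with harr
  have h0 : (0:Int) ∉ arr := by
    intro h
    rw [harr] at h
    simp only [List.nil_append, List.mem_filter, PySem.List.mem_pyRange_one] at h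
    omega
  rw [if_neg h0]
  by_cases hM : 1 < M
  · rw [if_pos hM]
    apply PySem.List.sorted_eq_sorted_of_perm _ _ _ (fun a b h => h)
    rw [List.perm_ext_iff_of_nodup (PySem.Set.nodup_ofList arr)
        (nodup_foldl_step _ _ ?_ _ (by simp [PySem.Set.empty]))]
    · intro v
      rw [PySem.Set.mem_ofList arr v, mem_found M v]
      rw [harr]
      simp only [List.nil_append, List.mem_filter, PySem.List.mem_pyRange_one, hp,
        List.any_eq_true, PySem.List.mem_pyRange_one, Bool.and_eq_true, beq_iff_eq]
      have k := key_iff M v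
      constructor
      · intro h; exact (k.mp h).2
      · intro h; exact k.mpr ⟨hM, h⟩
    · intro s x hs
      exact nodup_foldl_step _ _ (fun t y ht => by
        split
        · exact PySem.Set.nodup_add _ _ ht
        · exact ht) s hs
  · rw [if_neg hM]
    have : PySem.List.pyRange 1000 M 1 = [] := PySem.List.pyRange_one_eq_nil (by omega)
    rw [harr, this]
    rfl
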